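-- pv_equiv track=rewrite | github.com/cpartington/bio | bio_info/sequence/spectrum.py | build_spectrum
-- ===== SOURCE A (Python) =====
-- amino_mass_dict = {
--     "": 0, "G": 57, "A": 71, "S": 87, "P": 97,
--     "V": 99, "T": 101, "C": 103, "I": 113,
--     "L": 113, "N": 114, "D": 115, "K": 128,
--     "Q": 128, "E": 129, "M": 131, "H": 137,
--     "F": 147, "R": 156, "Y": 163, "W": 186
-- }
--
-- def get_peptide_mass(peptide):
--     """
--     Gets the mass of a given peptide.
--
--     :param peptide: a peptide in string or list form; can
--            be a combination of integer masses and peptide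
--            character representations
--
--     :return: the total mass of the peptide
--     """
--     mass = 0
--     if isinstance(peptide, int):
--         return peptide
--     for amino in peptide:
--         if isinstance(amino, int):
--             mass += amino
--         else:
--             mass += amino_mass_dict[amino]
--     return mass
--
-- def build_spectrum(peptide, cyclic=False):
--     """
--     Builds a spectrum given a peptide.
--
--     :param peptide: the peptide to build a spectrum for
--     :param cyclic: if True, treat the string as circular
--
--     :return: the created spectrum as a list of integers
--     """
--     masses = [0]
--     if isinstance(peptide, int):
--         masses += [peptide]
--         return masses
--     for i in range(len(peptide)):
--         masses += [masses[i] + get_peptide_mass(peptide[i])]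
--     spec = [0]
--     if cyclic:
--         peptide_mass = masses[len(peptide)]
--     for i in range(len(peptide) - 1):
--         for j in range(i + 1, len(peptide)):
--             spec += [masses[j] - masses[i]]
--             if cyclic:
--                 spec += [peptide_mass - (masses[j] - masses[i])]
--     spec += [masses[len(peptide)]]
--     spec.sort()
--     return spec
-- ===== SOURCE B (Python) =====
-- amino_mass_dict = {
--     "": 0, "G": 57, "A": 71, "S": 87, "P": 97,
--     "V": 99, "T": 101, "C": 103, "I": 113,
--     "L": 113, "N": 114, "D": 115, "K": 128,
--     "Q": 128, "E": 129, "M": 131, "H": 137,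
--     "F": 147, "R": 156, "Y": 163, "W": 186
-- }
--
--
-- def get_peptide_mass(peptide):
--     if isinstance(peptide, int):
--         return peptide
--     mass = 0
--     for amino in peptide:
--         mass += amino if isinstance(amino, int) else amino_mass_dict[amino]
--     return mass
--
--
-- def build_spectrum(peptide, cyclic=False):
--     if isinstance(peptide, int):
--         return [0, peptide]
--     peptide_mass = get_peptide_mass(peptide)
--     n = len(peptide)
--     spec = [0]
--     for i in range(n - 1):
--         for j in range(i + 1, n):
--             m = get_peptide_mass(peptide[i:j])
--             spec.append(m)
--             if cyclic:
--                 spec.append(peptide_mass - m)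
--     spec.append(peptide_mass)
--     spec.sort()
--     return spec
-- ===== Notes on version B (the rewrite author's own statement) =====
-- stated objective: alternative
-- what changed: B drops A's incrementally-built prefix-sum mass array and index arithmetic, computing each subpeptide mass directly by summing over the slice peptide[i:j] with get_peptide_mass; Pre_ excludes only strings containing characters outside the amino-acid alphabet, on which A raises KeyError.
import Mathlib
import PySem

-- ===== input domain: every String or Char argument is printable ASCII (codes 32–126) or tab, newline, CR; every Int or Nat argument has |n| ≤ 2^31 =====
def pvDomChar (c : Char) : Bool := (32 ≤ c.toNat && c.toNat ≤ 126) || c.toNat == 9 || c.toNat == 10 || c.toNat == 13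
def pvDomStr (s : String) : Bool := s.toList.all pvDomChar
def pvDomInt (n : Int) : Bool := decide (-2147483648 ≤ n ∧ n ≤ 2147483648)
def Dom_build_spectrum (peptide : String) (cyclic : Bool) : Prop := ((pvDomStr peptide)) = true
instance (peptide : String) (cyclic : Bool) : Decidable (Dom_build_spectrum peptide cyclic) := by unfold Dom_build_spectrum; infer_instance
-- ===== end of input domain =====

-- B replaces A's prefix-sum mass array and index arithmetic by direct summation over each
-- slice peptide[i:j] (alternative decomposition, not faster).

-- ===== PORT A =====
-- amino_mass_dict lookup for a single character key; the `_ => 0` branch is Python's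
-- KeyError and is excluded by Pre_build_spectrum.
def aminoMass (c : Char) : Int :=
  match c with
  | 'G' => 57 | 'A' => 71 | 'S' => 87 | 'P' => 97 | 'V' => 99 | 'T' => 101
  | 'C' => 103 | 'I' => 113 | 'L' => 113 | 'N' => 114 | 'D' => 115 | 'K' => 128
  | 'Q' => 128 | 'E' => 129 | 'M' => 131 | 'H' => 137 | 'F' => 147 | 'R' => 156
  | 'Y' => 163 | 'W' => 186
  | _ => 0

-- A calls get_peptide_mass(peptide[i]) on a one-character string: one loop step, one dict
-- lookup, i.e. aminoMass of that character.  All list indices A uses are in range, so the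
-- `.getD _ 0` defaults are never taken.
def build_spectrum (peptide : String) (cyclic : Bool) : List Int :=
  let cs := peptide.toList
  let n := cs.length
  -- masses = [0]; for i in range(len(peptide)): masses += [masses[i] + get_peptide_mass(peptide[i])]
  let masses : List Int :=
    (List.range n).foldl (fun ms i => ms ++ [ms.getD i 0 + aminoMass (cs.getD i ' ')]) [0]
  let peptide_mass : Int := masses.getD n 0
  let spec : List Int :=
    (List.range (n - 1)).foldl (fun spec i =>
      (List.range' (i + 1) (n - (i + 1))).foldl (fun spec j =>
        (spec ++ [masses.getD j 0 - masses.getD i 0]) ++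
          (if cyclic then [peptide_mass - (masses.getD j 0 - masses.getD i 0)] else [])) spec) [0]
  PySem.List.sorted (spec ++ [masses.getD n 0]) (fun x => x) false

-- ===== PORT B =====
-- get_peptide_mass on a string: sum of the dict lookups.
def getPeptideMass (cs : List Char) : Int :=
  cs.foldl (fun m a => m + aminoMass a) 0

def build_spectrum_alt (peptide : String) (cyclic : Bool) : List Int :=
  let cs := peptide.toList
  let n := cs.length
  let peptide_mass := getPeptideMass cs
  let spec : List Int :=
    (List.range (n - 1)).foldl (fun spec i =>
      (List.range' (i + 1) (n - (i + 1))).foldl (fun spec (j : Nat) =>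
        let m := getPeptideMass (PySem.List.slice cs (some (i : Int)) (some (j : Int)))
        (spec ++ [m]) ++ (if cyclic then [peptide_mass - m] else [])) spec) [0]
  PySem.List.sorted (spec ++ [peptide_mass]) (fun x => x) false

-- ===== PRECONDITION & SPEC =====
-- Pre_ excludes exactly the strings containing a character outside the amino-acid alphabet,
-- on which the Python A raises KeyError (B raises there too).
def Pre_build_spectrum (peptide : String) (cyclic : Bool) : Prop :=
  peptide.toList.all (fun c => c ∈ "GASPVTCILNDKQEMHFRYW".toList) = true
instance (peptide : String) (cyclic : Bool) : Decidable (Pre_build_spectrum peptide cyclic) := by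
  unfold Pre_build_spectrum; infer_instance

def pvWitness_build_spectrum : String × Bool := ("NQEL", true)

def Spec_build_spectrum (peptide : String) (cyclic : Bool) (out : List Int) : Prop := out = build_spectrum_alt peptide cyclic
instance (peptide : String) (cyclic : Bool) (out : List Int) : Decidable (Spec_build_spectrum peptide cyclic out) := by unfold Spec_build_spectrum; infer_instance

-- ===== CLAIM (what is proved, stated in full; the proofs are below) =====
def Claim_equal_build_spectrum : Prop := ∀ (peptide : String) (cyclic : Bool), Dom_build_spectrum peptide cyclic → Pre_build_spectrum peptide cyclic → Spec_build_spectrum peptide cyclic (build_spectrum peptide cyclic)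

-- ===== LEMMAS AND PROOFS =====

theorem foldl_add_shift (xs : List Char) (a : Int) :
    xs.foldl (fun m c => m + aminoMass c) a = a + getPeptideMass xs := by
  unfold getPeptideMass
  induction xs generalizing a with
  | nil => simp
  | cons x xs ih => rw [List.foldl_cons, List.foldl_cons, ih, ih (0 + aminoMass x)]; ring

theorem getPeptideMass_append (xs ys : List Char) :
    getPeptideMass (xs ++ ys) = getPeptideMass xs + getPeptideMass ys := by
  unfold getPeptideMass
  rw [List.foldl_append]
  exact foldl_add_shift ys _

-- A's masses list is the list of the m+1 prefix masses.
theorem masses_eq (cs : List Char) (m : Nat) (hm : m ≤ cs.length) :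
    (List.range m).foldl (fun ms i => ms ++ [ms.getD i 0 + aminoMass (cs.getD i ' ')]) [0]
      = (List.range (m + 1)).map (fun k => getPeptideMass (cs.take k)) := by
  induction m with
  | zero => simp [getPeptideMass]
  | succ m ih =>
    rw [List.range_succ, List.foldl_append, ih (by omega), List.foldl_cons, List.foldl_nil]
    rw [List.range_succ (n := m + 1), List.map_append]
    congr 1
    have hlen : ((List.range (m + 1)).map (fun k => getPeptideMass (cs.take k))).getD m 0
        = getPeptideMass (cs.take m) := by
      rw [List.getD_eq_getElem?_getD, List.getElem?_map, List.getElem?_range (by omega)]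
      rfl
    rw [hlen]
    have hstep : cs.take (m + 1) = cs.take m ++ [cs.getD m ' '] := by
      have h2 : cs.take (m + 1) = cs.take m ++ (cs.drop m).take 1 := by
        rw [← List.take_add]
      rw [h2]
      congr 1
      rcases h : cs.drop m with _ | ⟨c, t⟩
      · exfalso; have := List.length_drop (l := cs) (i := m); rw [h] at this; simp at this; omega
      · have h0 : cs[m]? = some c := by
          have h1 : (cs.drop m)[0]? = some c := by rw [h]; rfl
          simpa using h1
        simp [List.getD_eq_getElem?_getD, h0]
    simp only [List.map_cons, List.map_nil, hstep, getPeptideMass_append]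
    simp [getPeptideMass]

theorem getD_map_prefix (cs : List Char) (n k : Nat) (hk : k ≤ n) :
    ((List.range (n + 1)).map (fun k => getPeptideMass (cs.take k))).getD k 0
      = getPeptideMass (cs.take k) := by
  rw [List.getD_eq_getElem?_getD, List.getElem?_map, List.getElem?_range (by omega)]
  rfl

-- the mass of the slice peptide[i:j] is the difference of the prefix masses
theorem mass_diff (cs : List Char) (i j : Nat) (hij : i ≤ j) :
    getPeptideMass (cs.take j) - getPeptideMass (cs.take i)
      = getPeptideMass (PySem.List.slice cs (some (i : Int)) (some (j : Int))) := by
  rw [PySem.List.slice_natCast]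
  have h : cs.take j = cs.take i ++ (cs.drop i).take (j - i) := by
    rw [← List.take_add, Nat.add_sub_cancel' hij]
  rw [h, getPeptideMass_append]; ring

-- ===== VERDICT =====
theorem build_spectrum_spec : Claim_equal_build_spectrum := by
  intro peptide cyclic _ _
  unfold Spec_build_spectrum build_spectrum build_spectrum_alt
  dsimp only
  rw [masses_eq peptide.toList peptide.toList.length le_rfl]
  have hpm : ((List.range (peptide.toList.length + 1)).map
        (fun k => getPeptideMass (peptide.toList.take k))).getD peptide.toList.length 0
      = getPeptideMass peptide.toList := by
    rw [getD_map_prefix _ _ _ le_rfl, List.take_length]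
  rw [hpm]
  congr 1
  congr 1
  apply PySem.List.foldl_congr_mem
  intro acc i hi
  apply PySem.List.foldl_congr_mem
  intro acc2 j hj
  have hi' : i < peptide.toList.length - 1 := List.mem_range.mp hi
  have hj' : i + 1 ≤ j ∧ j < i + 1 + (peptide.toList.length - (i + 1)) := List.mem_range'_1.mp hj
  rw [getD_map_prefix _ _ j (by omega), getD_map_prefix _ _ i (by omega),
    mass_diff _ i j (by omega)]
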